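-- pv_equiv track=rewrite | github.com/arturovaine/project-restaurant-orders | src/analyze_log.py | never_went
-- ===== SOURCE A (Python) =====
-- def never_went(orders, name):
--     never_went = set()
--     for order in orders:
--         never_went.add(order[2])
--     for order in orders:
--         if order[0] == name and order[2] in never_went:
--             never_went.remove(order[2])
--     return never_went
-- ===== SOURCE B (Python) =====
-- def never_went(orders, name):
--     went = {}
--     for order in orders:
--         went[order[2]] = went.get(order[2], False) or order[0] == name
--     return {value for value, w in went.items() if not w}
-- ===== Notes on version B (the rewrite author's own statement) =====
-- stated objective: alternative
-- what changed: Replaces A's build-a-set-then-mutate-remove (two loops over orders, in-place set removal) by a single hash index: one dict keyed by value accumulating an OR-ed 'went' flag, then a comprehension keeping the keys whose flag is false.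
import Mathlib
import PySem

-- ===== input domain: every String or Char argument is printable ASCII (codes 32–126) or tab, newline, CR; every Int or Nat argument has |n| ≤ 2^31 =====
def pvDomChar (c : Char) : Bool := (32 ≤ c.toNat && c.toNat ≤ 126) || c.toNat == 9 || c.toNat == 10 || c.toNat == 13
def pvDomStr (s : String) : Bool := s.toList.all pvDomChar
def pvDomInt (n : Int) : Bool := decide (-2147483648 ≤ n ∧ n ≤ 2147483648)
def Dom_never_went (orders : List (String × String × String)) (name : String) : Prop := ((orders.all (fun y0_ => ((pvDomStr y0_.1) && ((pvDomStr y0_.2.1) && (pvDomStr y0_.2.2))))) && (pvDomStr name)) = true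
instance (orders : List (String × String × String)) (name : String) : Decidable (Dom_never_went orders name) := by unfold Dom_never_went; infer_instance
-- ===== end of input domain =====

-- ===== PORT A =====
-- B replaces A's build-a-set-then-mutate-remove by a single dict keyed by value
-- accumulating an OR-ed 'went' flag, read off by a final comprehension (objective: alternative).
-- Python A: build set of all order[2]; then for each order with order[0]==name and
-- order[2] still in the set, remove it.  Guarded 'remove' on a present element = discard.
def never_went (orders : List (String × String × String)) (name : String) : List String :=
  let s := orders.foldl (fun s o => PySem.Set.add s o.2.2) PySem.Set.empty
  orders.foldl
    (fun s o =>
      if o.1 == name && PySem.Set.contains s o.2.2 then PySem.Set.discard s o.2.2 else s) s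

-- ===== PORT B =====
-- went[order[2]] = went.get(order[2], False) or order[0] == name; then keep keys with flag false.
def never_went_alt (orders : List (String × String × String)) (name : String) : List String :=
  let went := orders.foldl
    (fun (d : PySem.Dict String Bool) o =>
      d.insert o.2.2 (d.getD o.2.2 false || (o.1 == name))) PySem.Dict.empty
  (went.items.filter (fun kv => !kv.2)).map (·.1)

-- ===== PRECONDITION & SPEC =====
def Spec_never_went (orders : List (String × String × String)) (name : String) (out : List String) : Prop := out = never_went_alt orders name
instance (orders : List (String × String × String)) (name : String) (out : List String) : Decidable (Spec_never_went orders name out) := by unfold Spec_never_went; infer_instance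

-- ===== CLAIM =====
def Claim_equal_never_went : Prop := ∀ (orders : List (String × String × String)) (name : String), Dom_never_went orders name → Spec_never_went orders name (never_went orders name)

-- ===== LEMMAS AND PROOFS =====

-- the values of orders matching `name`, as a plain list
def pvMine (orders : List (String × String × String)) (name : String) : List String :=
  orders.filterMap (fun o => if o.1 == name then some o.2.2 else none)

-- A's removal loop filters the current set by non-membership in pvMine
theorem pvRemove_loop (orders : List (String × String × String)) (name : String)
    (s : PySem.Set String) :
    orders.foldl
      (fun s o =>
        if o.1 == name && PySem.Set.contains s o.2.2 then PySem.Set.discard s o.2.2 else s) s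
      = s.filter (fun x => !(pvMine orders name).contains x) := by
  induction orders generalizing s with
  | nil => simp [pvMine]
  | cons o rest ih =>
      simp only [List.foldl_cons]
      by_cases hn : o.1 = name
      · by_cases hc : o.2.2 ∈ s
        · rw [if_pos (by simp [hn, PySem.Set.contains, hc])]
          rw [ih]
          rw [PySem.Set.discard, List.filter_filter]
          apply List.filter_congr
          intro x _
          simp only [pvMine, List.filterMap_cons, beq_iff_eq, hn]
          cases h2 : (x == o.2.2) <;> simp [h2]
        · rw [if_neg (by simp [PySem.Set.contains, hc])]
          rw [ih]
          apply List.filter_congr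
          intro x hx
          have hxv : (x == o.2.2) = false := by
            simp only [beq_eq_false_iff_ne]
            intro he; exact hc (he ▸ hx)
          simp [pvMine, hn, hxv]
      · rw [if_neg (by simp [hn])]
        rw [ih]
        simp [pvMine, hn]

-- B's dict fold: the accumulated flag at v is the seed's flag OR-ed with v's occurrence in pvMine
theorem pvFlag_fold (orders : List (String × String × String)) (name : String)
    (d : PySem.Dict String Bool) (v : String) :
    (orders.foldl
      (fun (d : PySem.Dict String Bool) o =>
        d.insert o.2.2 (d.getD o.2.2 false || (o.1 == name))) d).getD v false
      = (d.getD v false || (pvMine orders name).contains v) := by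
  induction orders generalizing d with
  | nil => simp [pvMine]
  | cons o rest ih =>
      simp only [List.foldl_cons]
      rw [ih]
      rw [PySem.Dict.getD_insert]
      by_cases hv : v = o.2.2
      · subst hv
        by_cases hn : o.1 = name
        · simp [pvMine, hn]
        · have hb : (o.1 == name) = false := by simpa using hn
          simp [pvMine, hn, hb]
      · by_cases hn : o.1 = name
        · have hxv : (v == o.2.2) = false := by simpa using hv
          simp [hv, pvMine, hn, hxv]
        · simp [hv, pvMine, hn]

-- ===== VERDICT =====
theorem never_went_spec : Claim_equal_never_went := by
  intro orders name _
  unfold Spec_never_went never_went never_went_alt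
  simp only []
  rw [pvRemove_loop]
  have hnd : (orders.foldl
      (fun (d : PySem.Dict String Bool) o =>
        d.insert o.2.2 (d.getD o.2.2 false || (o.1 == name))) PySem.Dict.empty).keys.Nodup :=
    PySem.Dict.nodup_keys_foldl_insert_key orders (fun o => o.2.2) _ _
      PySem.Dict.nodup_keys_empty
  have hkeys : (orders.foldl
      (fun (d : PySem.Dict String Bool) o =>
        d.insert o.2.2 (d.getD o.2.2 false || (o.1 == name))) PySem.Dict.empty).keys
      = orders.foldl (fun s o => PySem.Set.add s o.2.2) PySem.Set.empty := by
    rw [PySem.Dict.keys_foldl_insert_key orders (fun o => o.2.2)]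
    rw [← PySem.Set.update_map_eq_foldl_add]
    simp [PySem.Dict.keys_empty, PySem.Set.empty]
  rw [PySem.Dict.items_eq_map_keys _ hnd false, List.filter_map, List.map_map]
  simp only [Function.comp_def, pvFlag_fold, PySem.Dict.getD_empty, Bool.false_or]
  rw [hkeys]
  simp
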